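-- pv_equiv track=rewrite | github.com/Pichayanon/detect-green-circle | extract_graph_from_image.py | is_year_x_label_valid_pair
-- ===== SOURCE A (Python) =====
-- def is_year_x_label_valid_pair(labels):
--     try:
--         years = [int(lbl) for lbl in labels if lbl.isdigit()]
--         if len(years) < 2:
--             return False
--         num_pairs = len(years) // 2
--         if num_pairs == 0:
--             return False
--
--         first_diff = years[1] - years[0]
--         for i in range(1, num_pairs):
--             diff = years[2 * i + 1] - years[2 * i]
--             if diff != first_diff:
--                 return False
--         return True
--     except Exception:
--         return False
-- ===== SOURCE B (Python) =====
-- def is_year_x_label_valid_pair(labels):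
--     try:
--         years = [int(lbl) for lbl in labels if lbl.isdigit()]
--         if len(years) < 2:
--             return False
--         it = iter(years)
--         diffs = [b - a for a, b in zip(it, it)]
--
--         def const(lo, hi):
--             # divide and conquer: diffs[lo:hi] is constant iff both halves are
--             # constant and the halves agree at their left ends
--             if hi - lo == 1:
--                 return True
--             mid = (lo + hi) // 2
--             return const(lo, mid) and const(mid, hi) and diffs[mid] == diffs[lo]
--
--         return const(0, len(diffs))
--     except Exception:
--         return False
-- ===== Notes on version B (the rewrite author's own statement) =====
-- stated objective: alternative
-- what changed: Instead of A's indexed linear loop comparing every pair's difference to a stored first_diff, B materialises the list of pair differences once and decides its constancy by divide and conquer (each half constant and the halves' left endpoints equal), a different recursion structure over the data.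
import Mathlib
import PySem

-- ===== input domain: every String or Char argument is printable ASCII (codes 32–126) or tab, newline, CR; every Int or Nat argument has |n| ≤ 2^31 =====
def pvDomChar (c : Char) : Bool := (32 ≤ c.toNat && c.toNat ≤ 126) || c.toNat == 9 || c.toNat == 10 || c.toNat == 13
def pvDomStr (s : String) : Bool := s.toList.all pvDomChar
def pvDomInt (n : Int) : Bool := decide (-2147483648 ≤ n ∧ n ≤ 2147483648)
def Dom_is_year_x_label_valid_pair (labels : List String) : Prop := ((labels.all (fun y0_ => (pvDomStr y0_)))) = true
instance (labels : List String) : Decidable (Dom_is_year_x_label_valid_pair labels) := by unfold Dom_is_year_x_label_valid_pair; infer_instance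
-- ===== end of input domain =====

-- B materialises the list of pair differences and decides its constancy by divide and conquer
-- (halves constant and agreeing at their left ends) instead of A's indexed linear loop against
-- a stored first_diff; objective: alternative, same cost.

-- ===== PORT A =====
-- years = [int(lbl) for lbl in labels if lbl.isdigit()]  (int() cannot raise on a digit string; getD 0 is unreachable)
def pvYears (labels : List String) : List Int :=
  labels.filterMap (fun lbl =>
    if PySem.Str.strIsdigit lbl then some ((PySem.Int.ofStr? lbl).getD 0) else none)

-- the 'for i in range(1, num_pairs)' loop with its early return; a none from pyGet? would be the except path
def pvCheckA (years : List Int) (first_diff : Int) (i np : Int) : Bool :=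
  if _h : i < np then
    match PySem.List.pyGet? years (2 * i + 1), PySem.List.pyGet? years (2 * i) with
    | some y1, some y0 =>
        if y1 - y0 ≠ first_diff then false else pvCheckA years first_diff (i + 1) np
    | _, _ => false
  else true
termination_by (np - i).toNat
decreasing_by omega

def is_year_x_label_valid_pair (labels : List String) : Bool :=
  let years := pvYears labels
  if (years.length : Int) < 2 then false
  else
    let num_pairs := PySem.Int.floordiv (years.length : Int) 2
    if num_pairs = 0 then false
    else
      match PySem.List.pyGet? years 1, PySem.List.pyGet? years 0 with
      | some y1, some y0 => pvCheckA years (y1 - y0) 1 num_pairs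
      | _, _ => false

-- ===== PORT B =====
-- diffs = [b - a for a, b in zip(it, it)]: consume the iterator two elements at a time
def pvDiffs (xs : List Int) : List Int :=
  match xs with
  | a :: b :: rest => (b - a) :: pvDiffs rest
  | _ => []

-- const(lo, hi): Python returns True when hi - lo == 1 and is only ever called with lo < hi,
-- so the 'hi - lo ≤ 1' guard only adds totality for unreachable hi ≤ lo; an out-of-range
-- diffs[mid]/diffs[lo] (the none branch) would be the except path returning False
def pvConst (diffs : List Int) (lo hi : Nat) : Bool :=
  if hi - lo ≤ 1 then true
  else
    let mid := (lo + hi) / 2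
    pvConst diffs lo mid &&
      (pvConst diffs mid hi &&
        match diffs[mid]?, diffs[lo]? with
        | some x, some y => x == y
        | _, _ => false)
termination_by hi - lo
decreasing_by all_goals omega

def is_year_x_label_valid_pair_alt (labels : List String) : Bool :=
  let years := pvYears labels
  if (years.length : Int) < 2 then false
  else
    let diffs := pvDiffs years
    pvConst diffs 0 diffs.length

-- ===== PRECONDITION & SPEC =====
def Spec_is_year_x_label_valid_pair (labels : List String) (out : Bool) : Prop := out = is_year_x_label_valid_pair_alt labels
instance (labels : List String) (out : Bool) : Decidable (Spec_is_year_x_label_valid_pair labels out) := by unfold Spec_is_year_x_label_valid_pair; infer_instance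

-- ===== CLAIM (what is proved, stated in full; the proofs are below) =====
def Claim_equal_is_year_x_label_valid_pair : Prop := ∀ (labels : List String), Dom_is_year_x_label_valid_pair labels → Spec_is_year_x_label_valid_pair labels (is_year_x_label_valid_pair labels)

-- ===== LEMMAS AND PROOFS =====

-- proof-only helper: the disjoint consecutive pairs of a list
def pvPairs (xs : List Int) : List (Int × Int) :=
  match xs with
  | [] => []
  | [_] => []
  | a :: b :: rest => (a, b) :: pvPairs rest

set_option maxHeartbeats 400000 in
theorem length_pvPairs (xs : List Int) : (pvPairs xs).length = xs.length / 2 := by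
  induction xs using pvPairs.induct with
  | case1 => simp [pvPairs]
  | case2 a => simp [pvPairs]
  | case3 a b rest ih => simp [pvPairs, ih]; omega

set_option maxHeartbeats 400000 in
theorem getElem?_pvPairs (xs : List Int) (k : Nat) :
    (pvPairs xs)[k]? =
      xs[2 * k]?.bind (fun a => (xs[2 * k + 1]?).map (fun b => (a, b))) := by
  induction xs using pvPairs.induct generalizing k with
  | case1 => simp [pvPairs]
  | case2 a =>
    cases k with
    | zero => simp [pvPairs]
    | succ k => simp [pvPairs]
  | case3 a b rest ih =>
    cases k with
    | zero => simp [pvPairs]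
    | succ k =>
      have h1 : 2 * (k + 1) = 2 * k + 1 + 1 := by omega
      simp only [pvPairs, h1, List.getElem?_cons_succ]
      exact ih k

set_option maxHeartbeats 400000 in
theorem pvCheckA_eq_all (xs : List Int) (d : Int) (k : Nat) :
    pvCheckA xs d (k : Int) ((xs.length / 2 : Nat) : Int) =
      ((pvPairs xs).drop k).all (fun p => p.2 - p.1 == d) := by
  by_cases h : k < xs.length / 2
  · rw [pvCheckA]
    have hk : (k : Int) < ((xs.length / 2 : Nat) : Int) := by exact_mod_cast h
    rw [dif_pos hk]
    have hlt : 2 * k + 1 < xs.length := by omega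
    have h0 : PySem.List.pyGet? xs (2 * (k : Int)) = some (xs[2 * k]) := by
      have hc : (2 * (k : Int)) = ((2 * k : Nat) : Int) := by push_cast; ring
      rw [hc, PySem.List.pyGet?_natCast, List.getElem?_eq_getElem (by omega)]
    have h1 : PySem.List.pyGet? xs (2 * (k : Int) + 1) = some (xs[2 * k + 1]) := by
      have hc : (2 * (k : Int) + 1) = ((2 * k + 1 : Nat) : Int) := by push_cast; ring
      rw [hc, PySem.List.pyGet?_natCast, List.getElem?_eq_getElem hlt]
    have hdrop : (pvPairs xs).drop k = (xs[2 * k], xs[2 * k + 1]) :: (pvPairs xs).drop (k + 1) := by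
      have hk' : k < (pvPairs xs).length := by rw [length_pvPairs]; exact h
      rw [List.drop_eq_getElem_cons hk']
      congr 1
      have hg := getElem?_pvPairs xs k
      rw [List.getElem?_eq_getElem hk',
          List.getElem?_eq_getElem (by omega : 2 * k < xs.length),
          List.getElem?_eq_getElem hlt] at hg
      simpa using hg
    have hrec : ((k : Int) + 1) = ((k + 1 : Nat) : Int) := by push_cast; ring
    have ih := pvCheckA_eq_all xs d (k + 1)
    rw [hdrop]
    by_cases hd : xs[2 * k + 1] - xs[2 * k] = d
    · simp only [h0, h1, hd, ne_eq, not_true_eq_false, List.all_cons, hrec, ih]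
      simp
    · simp [h0, h1, hd]
  · rw [pvCheckA]
    have hk : ¬ ((k : Int) < ((xs.length / 2 : Nat) : Int)) := by exact_mod_cast h
    rw [dif_neg hk]
    have hnil : (pvPairs xs).drop k = [] := by
      apply List.drop_eq_nil_of_le
      rw [length_pvPairs]; omega
    simp [hnil]
termination_by xs.length / 2 - k
decreasing_by omega

set_option maxHeartbeats 400000 in
theorem pvDiffs_eq_map (xs : List Int) :
    pvDiffs xs = (pvPairs xs).map (fun p => p.2 - p.1) := by
  induction xs using pvPairs.induct with
  | case1 => simp [pvDiffs, pvPairs]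
  | case2 a => simp [pvDiffs, pvPairs]
  | case3 a b rest ih => simp [pvDiffs, pvPairs, ih]

-- divide-and-conquer constancy: const lo hi ⟺ every entry of diffs[lo:hi] equals diffs[lo]
set_option maxHeartbeats 400000 in
theorem pvConst_iff (diffs : List Int) (lo hi : Nat) (hlo : lo < hi) (hhi : hi ≤ diffs.length) :
    pvConst diffs lo hi = true ↔ (∀ i, lo ≤ i → i < hi → diffs[i]? = diffs[lo]?) := by
  rw [pvConst]
  by_cases h : hi - lo ≤ 1
  · rw [if_pos h]
    constructor
    · intro _ i h1 h2
      have : i = lo := by omega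
      rw [this]
    · intro _; rfl
  · rw [if_neg h]
    have hmidlo : lo < (lo + hi) / 2 := by omega
    have hmidhi : (lo + hi) / 2 < hi := by omega
    have hmlt : (lo + hi) / 2 < diffs.length := by omega
    have hllt : lo < diffs.length := by omega
    have ih1 := pvConst_iff diffs lo ((lo + hi) / 2) hmidlo (by omega)
    have ih2 := pvConst_iff diffs ((lo + hi) / 2) hi hmidhi hhi
    simp only [List.getElem?_eq_getElem hmlt, List.getElem?_eq_getElem hllt,
      Bool.and_eq_true, beq_iff_eq, ih1, ih2]
    constructor
    · rintro ⟨hL, hR, heq⟩ i h1 h2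
      by_cases hc : i < (lo + hi) / 2
      · exact hL i h1 hc
      · rw [hR i (by omega) h2, heq]
    · intro hP
      refine ⟨fun i h1 h2 => hP i h1 (by omega), fun i h1 h2 => ?_, ?_⟩
      · have hm := hP ((lo + hi) / 2) (by omega) hmidhi
        rw [List.getElem?_eq_getElem hmlt] at hm
        rw [hP i (by omega) h2, Option.some.inj hm]
      · have hm := hP ((lo + hi) / 2) (by omega) hmidhi
        rw [List.getElem?_eq_getElem hmlt] at hm
        exact Option.some.inj hm
termination_by hi - lo
decreasing_by all_goals omega

set_option maxHeartbeats 400000 in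
theorem all_eq_const (c : Int) (ds : List Int) :
    ds.all (fun x => x == c) = pvConst (c :: ds) 0 (c :: ds).length := by
  rw [Bool.eq_iff_iff, List.all_eq_true,
    pvConst_iff (c :: ds) 0 (c :: ds).length (by simp) (le_refl _)]
  simp only [List.getElem?_cons_zero]
  constructor
  · intro hall i _ hlt
    cases i with
    | zero => simp
    | succ j =>
      have hj : j < ds.length := by simp at hlt; omega
      simp only [List.getElem?_cons_succ, List.getElem?_eq_getElem hj]
      have := hall ds[j] (List.getElem_mem hj)
      rw [beq_iff_eq] at this
      rw [this]
  · intro hP x hx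
    obtain ⟨j, hj, rfl⟩ := List.getElem_of_mem hx
    have := hP (j + 1) (by omega) (by simp; omega)
    simp only [List.getElem?_cons_succ, List.getElem?_eq_getElem hj] at this
    rw [beq_iff_eq]
    exact Option.some.inj this

-- ===== VERDICT (by name: the statement is the Claim_ definition above) =====
set_option maxHeartbeats 400000 in
theorem is_year_x_label_valid_pair_spec : Claim_equal_is_year_x_label_valid_pair := by
  intro labels _
  unfold Spec_is_year_x_label_valid_pair
  unfold is_year_x_label_valid_pair is_year_x_label_valid_pair_alt
  by_cases h : ((pvYears labels).length : Int) < 2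
  · simp only [h, if_true]
  · have hlen : 2 ≤ (pvYears labels).length := by omega
    have hfd : PySem.Int.floordiv ((pvYears labels).length : Int) 2
        = (((pvYears labels).length / 2 : Nat) : Int) := by
      exact_mod_cast PySem.Int.floordiv_natCast (pvYears labels).length 2
    have hnp : (((pvYears labels).length / 2 : Nat) : Int) ≠ 0 := by
      have : (pvYears labels).length / 2 ≠ 0 := by omega
      exact_mod_cast this
    simp only [h, if_false, hfd, if_neg hnp]
    match hxs : pvYears labels, hlen with
    | a :: b :: rest, _ =>
      have h0 : PySem.List.pyGet? (a :: b :: rest) 0 = some a := by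
        simpa using PySem.List.pyGet?_natCast (a :: b :: rest) 0
      have h1 : PySem.List.pyGet? (a :: b :: rest) 1 = some b := by
        simpa using PySem.List.pyGet?_natCast (a :: b :: rest) 1
      have hc := pvCheckA_eq_all (a :: b :: rest) (b - a) 1
      simp only [Nat.cast_one] at hc
      simp only [h0, h1, hc]
      have hp : pvPairs (a :: b :: rest) = (a, b) :: pvPairs rest := rfl
      have hd : pvDiffs (a :: b :: rest) = (b - a) :: pvDiffs rest := rfl
      rw [hp, hd, pvDiffs_eq_map]
      simp only [List.drop_succ_cons, List.drop_zero]
      rw [show ((pvPairs rest).all (fun p => p.2 - p.1 == b - a))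
            = ((pvPairs rest).map (fun p => p.2 - p.1)).all (fun x => x == b - a) by
          rw [List.all_map]; rfl]
      exact all_eq_const (b - a) ((pvPairs rest).map (fun p => p.2 - p.1))
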